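-- pv_equiv track=rewrite | github.com/douymLab/PhyloSOLID | src/mutation_integrator.py | find_all_path_nodes
-- ===== SOURCE A (Python) =====
-- def find_all_path_nodes(intersection_nodes, tree_parent_dict):
--     """
--     找到所有在连接交集节点的路径上的节点
--     """
--     all_path_nodes = set()
--     all_path_nodes.add('ROOT')  # 总是包含 ROOT
--
--     # 对于每个交集节点，找到从 ROOT 到该节点的路径
--     for node in intersection_nodes:
--         path_to_root = get_path_to_root(node, tree_parent_dict)
--         all_path_nodes.update(path_to_root)
--
--     # 找到连接不同交集节点的路径
--     intersection_list = list(intersection_nodes)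
--     for i in range(len(intersection_list)):
--         for j in range(i + 1, len(intersection_list)):
--             path_between = get_path_between_nodes(intersection_list[i], intersection_list[j], tree_parent_dict)
--             all_path_nodes.update(path_between)
--
--     return all_path_nodes
--
-- def get_path_to_root(node, tree_parent_dict):
--     """找到从节点到 ROOT 的路径"""
--     path = []
--     current = node
--     while current in tree_parent_dict:
--         path.append(current)
--         current = tree_parent_dict[current]
--         if current == 'ROOT':
--             path.append('ROOT')
--             break
--     return path
--
-- def get_path_between_nodes(node1, node2, tree_parent_dict):
--     """找到两个节点之间的路径"""
--     # 找到从 node1 到 ROOT 的路径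
--     path1 = get_path_to_root(node1, tree_parent_dict)
--     # 找到从 node2 到 ROOT 的路径
--     path2 = get_path_to_root(node2, tree_parent_dict)
--
--     # 反转路径，使其从 ROOT 开始
--     path1_from_root = list(reversed(path1))
--     path2_from_root = list(reversed(path2))
--
--     # 找到最近公共祖先 (LCA)
--     lca = None
--     for i in range(min(len(path1_from_root), len(path2_from_root))):
--         if path1_from_root[i] == path2_from_root[i]:
--             lca = path1_from_root[i]
--         else:
--             break
--
--     if lca is None:
--         return []
--
--     # 构建完整路径: node1 -> LCA -> node2
--     lca_index1 = path1_from_root.index(lca)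
--     lca_index2 = path2_from_root.index(lca)
--
--     path_node1_to_lca = path1_from_root[lca_index1:]
--     path_lca_to_node2 = path2_from_root[lca_index2:]
--
--     # 合并路径，去掉重复的 LCA
--     full_path = path_node1_to_lca + path_lca_to_node2[1:]
--     return full_path
-- ===== SOURCE B (Python) =====
-- def find_all_path_nodes(intersection_nodes, tree_parent_dict):
--     """Single upward pass: the pairwise-connection phase is redundant, because
--     every node on a path between two intersection nodes already lies on one of
--     their paths to ROOT."""
--     nodes = {'ROOT'}
--     for node in intersection_nodes:
--         current = node
--         while current in tree_parent_dict:
--             nodes.add(current)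
--             current = tree_parent_dict[current]
--             if current == 'ROOT':
--                 nodes.add('ROOT')
--                 break
--     return nodes
-- ===== Notes on version B (the rewrite author's own statement) =====
-- stated objective: faster
-- what changed: Dropped A's entire pairwise second phase (the nested i<j loop calling get_path_between_nodes), which provably adds no new node since every node on a path between two intersection nodes already lies on one of their paths to ROOT, and inlined the upward walk so the set is built in a single pass over the intersection nodes.
import Mathlib
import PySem

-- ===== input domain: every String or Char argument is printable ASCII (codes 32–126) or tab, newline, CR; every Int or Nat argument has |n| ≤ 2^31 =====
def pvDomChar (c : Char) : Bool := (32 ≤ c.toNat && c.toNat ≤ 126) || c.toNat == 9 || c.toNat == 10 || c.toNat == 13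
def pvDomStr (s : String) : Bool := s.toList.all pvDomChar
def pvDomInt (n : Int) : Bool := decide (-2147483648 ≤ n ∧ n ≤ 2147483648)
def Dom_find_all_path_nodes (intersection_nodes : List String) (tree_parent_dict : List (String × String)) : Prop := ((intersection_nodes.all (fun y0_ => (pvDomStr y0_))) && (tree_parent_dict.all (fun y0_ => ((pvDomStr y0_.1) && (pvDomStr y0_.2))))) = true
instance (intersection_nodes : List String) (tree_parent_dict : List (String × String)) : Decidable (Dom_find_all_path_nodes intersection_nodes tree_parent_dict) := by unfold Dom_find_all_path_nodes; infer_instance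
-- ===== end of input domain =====

-- B drops A's redundant pairwise phase and builds the set in ONE upward pass per node (objective: faster).

-- ===== PORT A =====
-- get_path_to_root's while loop, with fuel tree_parent_dict.length+1 (enough for any walk that terminates in Python)
def pvGetPathToRoot (d : PySem.Dict String String) : Nat → String → List String → List String
  | 0, _, path => path
  | fuel+1, current, path =>
    match d.get? current with
    | none => path
    | some parent =>
      if parent = "ROOT" then path ++ [current, "ROOT"]
      else pvGetPathToRoot d fuel parent (path ++ [current])

-- the 'for i in range(min(...)): if p1[i]==p2[i]: lca=p1[i] else: break' loop
def pvLcaLoop : List String → List String → Option String → Option String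
  | a :: as, b :: bs, lca => if a = b then pvLcaLoop as bs (some a) else lca
  | _, _, lca => lca

def pvGetPathBetween (d : PySem.Dict String String) (fuel : Nat) (n1 n2 : String) : List String :=
  let p1 := (pvGetPathToRoot d fuel n1 []).reverse
  let p2 := (pvGetPathToRoot d fuel n2 []).reverse
  match pvLcaLoop p1 p2 none with
  | none => []
  | some lca =>
    match PySem.List.index? p1 lca, PySem.List.index? p2 lca with
    | some i1, some i2 =>
      PySem.List.slice p1 (some (i1 : Int)) none ++
        PySem.List.slice (PySem.List.slice p2 (some (i2 : Int)) none) (some (1 : Int)) none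
    | _, _ => []   -- unreachable: the lca is a member of both p1 and p2

def find_all_path_nodes (intersection_nodes : List String) (tree_parent_dict : List (String × String)) : List String :=
  let d := PySem.Dict.mk tree_parent_dict
  let fuel := tree_parent_dict.length + 1
  let s0 : PySem.Set String := PySem.Set.add PySem.Set.empty "ROOT"
  let s1 := intersection_nodes.foldl
    (fun s node => PySem.Set.update s (pvGetPathToRoot d fuel node [])) s0
  let n : Int := intersection_nodes.length
  (PySem.List.pyRange 0 n 1).foldl (fun s i =>
    (PySem.List.pyRange (i+1) n 1).foldl (fun s j =>
      PySem.Set.update s (pvGetPathBetween d fuel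
        (PySem.List.pyGetD intersection_nodes i "") (PySem.List.pyGetD intersection_nodes j ""))) s) s1

-- ===== PORT B =====
-- the inlined upward walk: adds every visited node (and ROOT when reached) to the set
def pvWalkAdd (d : PySem.Dict String String) : Nat → String → PySem.Set String → PySem.Set String
  | 0, _, s => s
  | fuel+1, current, s =>
    match d.get? current with
    | none => s
    | some parent =>
      if parent = "ROOT" then PySem.Set.add (PySem.Set.add s current) "ROOT"
      else pvWalkAdd d fuel parent (PySem.Set.add s current)

def find_all_path_nodes_alt (intersection_nodes : List String) (tree_parent_dict : List (String × String)) : List String :=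
  let d := PySem.Dict.mk tree_parent_dict
  intersection_nodes.foldl (fun s node => pvWalkAdd d (tree_parent_dict.length + 1) node s)
    (PySem.Set.add PySem.Set.empty "ROOT")

-- ===== PRECONDITION & SPEC =====
def Spec_find_all_path_nodes (intersection_nodes : List String) (tree_parent_dict : List (String × String)) (out : List String) : Prop := out = find_all_path_nodes_alt intersection_nodes tree_parent_dict
instance (intersection_nodes : List String) (tree_parent_dict : List (String × String)) (out : List String) : Decidable (Spec_find_all_path_nodes intersection_nodes tree_parent_dict out) := by unfold Spec_find_all_path_nodes; infer_instance

-- ===== CLAIM (what is proved, stated in full; the proofs are below) =====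
def Claim_equal_find_all_path_nodes : Prop := ∀ (intersection_nodes : List String) (tree_parent_dict : List (String × String)), Dom_find_all_path_nodes intersection_nodes tree_parent_dict → Spec_find_all_path_nodes intersection_nodes tree_parent_dict (find_all_path_nodes intersection_nodes tree_parent_dict)

-- ===== LEMMAS AND PROOFS =====

-- B's inlined walk is A's path-building walk followed by a set update
theorem walkAdd_eq_update (d : PySem.Dict String String) :
    ∀ (fuel : Nat) (c : String) (path : List String) (s : PySem.Set String),
      pvWalkAdd d fuel c (PySem.Set.update s path) = PySem.Set.update s (pvGetPathToRoot d fuel c path) := by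
  intro fuel
  induction fuel with
  | zero => intro c path s; rfl
  | succ fuel ih =>
    intro c path s
    simp only [pvWalkAdd, pvGetPathToRoot]
    cases h : d.get? c with
    | none => rfl
    | some parent =>
      by_cases hr : parent = "ROOT"
      · simp [hr, PySem.Set.update_append, PySem.Set.update_cons, PySem.Set.update_nil]
      · simp only [hr, if_false]
        rw [← ih parent (path ++ [c]) s,
            PySem.Set.update_append, PySem.Set.update_cons, PySem.Set.update_nil]

-- a set update with elements already present is the identity
theorem update_of_subset {s : PySem.Set String} {l : List String}
    (h : ∀ y ∈ l, y ∈ s) : PySem.Set.update s l = s := by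
  rw [PySem.Set.update_eq_append_filter]
  have : (PySem.Set.ofList l).filter (fun y => !(PySem.Set.contains s y)) = [] := by
    rw [List.filter_eq_nil_iff]
    intro a ha
    have hs : a ∈ s := h a ((PySem.Set.mem_ofList l a).1 ha)
    simpa using hs
  rw [this, List.append_nil]

theorem mem_update_right {s : PySem.Set String} {l : List String} {y : String}
    (h : y ∈ s) : y ∈ PySem.Set.update s l :=
  (PySem.Set.mem_update s l y).2 (Or.inl h)

-- every node of a between-path lies on one of the two paths to root
theorem pathBetween_subset (d : PySem.Dict String String) (fuel : Nat) (a b : String) :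
    ∀ y ∈ pvGetPathBetween d fuel a b,
      y ∈ pvGetPathToRoot d fuel a [] ∨ y ∈ pvGetPathToRoot d fuel b [] := by
  intro y hy
  unfold pvGetPathBetween at hy
  simp only at hy
  split at hy
  · simp at hy
  · split at hy
    · rcases List.mem_append.1 hy with h1 | h2
      · exact Or.inl (List.mem_reverse.1 (PySem.List.mem_of_mem_slice _ _ _ h1))
      · exact Or.inr (List.mem_reverse.1 (PySem.List.mem_of_mem_slice _ _ _ (PySem.List.mem_of_mem_slice _ _ _ h2)))
    · simp at hy

-- membership is preserved along the first loop
theorem mem_foldl_update (g : String → List String) :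
    ∀ (l : List String) (s : PySem.Set String) (y : String), y ∈ s →
      y ∈ l.foldl (fun s node => PySem.Set.update s (g node)) s := by
  intro l
  induction l with
  | nil => intro s y h; exact h
  | cons a l ih => intro s y h; exact ih _ _ (mem_update_right h)

-- after the first loop, every node of every intersection node's path to root is in the set
theorem firstLoop_contains (d : PySem.Dict String String) (fuel : Nat) :
    ∀ (l : List String) (s : PySem.Set String) (x : String), x ∈ l →
      ∀ y ∈ pvGetPathToRoot d fuel x [],
        y ∈ l.foldl (fun s node => PySem.Set.update s (pvGetPathToRoot d fuel node [])) s := by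
  intro l
  induction l with
  | nil => intro s x hx; cases hx
  | cons a l ih =>
    intro s x hx y hy
    rcases List.mem_cons.1 hx with rfl | hx'
    · exact mem_foldl_update _ l _ y ((PySem.Set.mem_update _ _ _).2 (Or.inr hy))
    · exact ih _ x hx' y hy

theorem foldl_fixed {α β : Type} (f : β → α → β) (s : β) :
    ∀ (l : List α), (∀ a ∈ l, f s a = s) → l.foldl f s = s := by
  intro l
  induction l with
  | nil => intro _; rfl
  | cons a l ih =>
    intro h
    rw [List.foldl_cons, h a (List.mem_cons_self), ih (fun b hb => h b (List.mem_cons_of_mem a hb))]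

-- ===== VERDICT (by name: the statement is the Claim_ definition above) =====
theorem find_all_path_nodes_spec : Claim_equal_find_all_path_nodes := by
  intro ins tpd _
  unfold Spec_find_all_path_nodes find_all_path_nodes find_all_path_nodes_alt
  simp only []
  set d := PySem.Dict.mk tpd with hd
  set fuel := tpd.length + 1 with hfuel
  set s0 : PySem.Set String := PySem.Set.add PySem.Set.empty "ROOT" with hs0
  have hfirst : ins.foldl (fun s node => PySem.Set.update s (pvGetPathToRoot d fuel node [])) s0
      = ins.foldl (fun s node => pvWalkAdd d fuel node s) s0 := by
    have hfun : (fun (s : PySem.Set String) node => PySem.Set.update s (pvGetPathToRoot d fuel node []))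
        = (fun (s : PySem.Set String) node => pvWalkAdd d fuel node s) := by
      funext s node
      rw [← walkAdd_eq_update d fuel node [] s, PySem.Set.update_nil]
    rw [hfun]
  set s1 := ins.foldl (fun s node => PySem.Set.update s (pvGetPathToRoot d fuel node [])) s0 with hs1
  have hmem : ∀ x ∈ ins, ∀ y ∈ pvGetPathToRoot d fuel x [], y ∈ s1 := by
    intro x hx y hy; exact firstLoop_contains d fuel ins s0 x hx y hy
  have houter : (PySem.List.pyRange 0 (ins.length : Int) 1).foldl (fun s i =>
      (PySem.List.pyRange (i+1) (ins.length : Int) 1).foldl (fun s j =>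
        PySem.Set.update s (pvGetPathBetween d fuel
          (PySem.List.pyGetD ins i "") (PySem.List.pyGetD ins j ""))) s) s1 = s1 := by
    apply foldl_fixed
    intro i hi
    have hi' := (PySem.List.mem_pyRange_one).1 hi
    apply foldl_fixed
    intro j hj
    have hj' := (PySem.List.mem_pyRange_one).1 hj
    apply update_of_subset
    intro y hy
    have hgi : PySem.List.pyGetD ins i "" ∈ ins := by
      rw [PySem.List.pyGetD_eq_getElem ins "" (by omega) (by exact_mod_cast hi'.2)]
      exact List.getElem_mem _
    have hgj : PySem.List.pyGetD ins j "" ∈ ins := by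
      rw [PySem.List.pyGetD_eq_getElem ins "" (by omega) (by exact_mod_cast hj'.2)]
      exact List.getElem_mem _
    rcases pathBetween_subset d fuel _ _ y hy with h | h
    · exact hmem _ hgi y h
    · exact hmem _ hgj y h
  rw [houter, hfirst]
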